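-- pv_equiv track=rewrite | github.com/LULLULALLA0525/Everyday_CodingTest | 전구와 스위치.py | solution
-- ===== SOURCE A (Python) =====
-- def determine(bulbs, changed, idx):
-- 	if idx == 0:    # 시작 전구
-- 		if bulbs[idx] == 0:
-- 			next_changed = changed[idx]
-- 		else:   # bulbs[idx] == 1
-- 			next_changed = not changed[idx]
-- 	else:
-- 		if bulbs[idx] == 0:
-- 			next_changed = changed[idx - 1] != changed[idx]
-- 		else:   # bulbs[idx] == 1
-- 			next_changed = changed[idx - 1] == changed[idx]
-- 	return next_changed
--
-- def solution(n, start, end):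
-- 	bulbs = []
-- 	for i in range(n):
-- 		if start[i] == end[i]:
-- 			bulbs.append(0)
-- 		else:
-- 			bulbs.append(1)
--
-- 	answer = []
-- 	cases = [False, True]
-- 	for case in cases:
-- 		changed = [case]
-- 		for idx in range(n - 1):
-- 			changed.append(determine(bulbs, changed, idx))
-- 		completed = False
-- 		if bulbs[-1] == 0:
-- 			completed = changed[-2] == changed[-1]
-- 		else:  # bulbs[n - 1] == 1
-- 			completed = changed[-2] != changed[-1]
-- 		if completed:
-- 			count = 0
-- 			for i in range(n):
-- 				if changed[i]:
-- 					count += 1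
-- 			answer.append(count)
--
-- 	if len(answer) == 0:
-- 		return -1
-- 	else:
-- 		return min(answer)
-- ===== SOURCE B (Python) =====
-- def solution(n, start, end):
--     wrong = [start[i] != end[i] for i in range(n)]
--     best = -1
--     for first in (False, True):
--         w = wrong[:]
--         count = 0
--         if first:
--             count = 1
--             w[0] = not w[0]
--             if n > 1:
--                 w[1] = not w[1]
--         for i in range(1, n):
--             if w[i - 1]:
--                 count += 1
--                 w[i - 1] = not w[i - 1]
--                 w[i] = not w[i]
--                 if i + 1 < n:
--                     w[i + 1] = not w[i + 1]
--         if not w[n - 1]: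
--             if best == -1 or count < best:
--                 best = count
--     return best
-- ===== Notes on version B (the rewrite author's own statement) =====
-- stated objective: alternative
-- what changed: B replaces A's per-case XOR-propagated `changed` array (computed via the `determine` helper, completion test on changed[-2]/changed[-1], and min over a collected answer list) by a direct greedy simulation that copies the mismatch mask, presses each switch whose left neighbour bulb is still wrong while mutating the three affected bulbs in place, and keeps a running best instead of a list.
import Mathlib
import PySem

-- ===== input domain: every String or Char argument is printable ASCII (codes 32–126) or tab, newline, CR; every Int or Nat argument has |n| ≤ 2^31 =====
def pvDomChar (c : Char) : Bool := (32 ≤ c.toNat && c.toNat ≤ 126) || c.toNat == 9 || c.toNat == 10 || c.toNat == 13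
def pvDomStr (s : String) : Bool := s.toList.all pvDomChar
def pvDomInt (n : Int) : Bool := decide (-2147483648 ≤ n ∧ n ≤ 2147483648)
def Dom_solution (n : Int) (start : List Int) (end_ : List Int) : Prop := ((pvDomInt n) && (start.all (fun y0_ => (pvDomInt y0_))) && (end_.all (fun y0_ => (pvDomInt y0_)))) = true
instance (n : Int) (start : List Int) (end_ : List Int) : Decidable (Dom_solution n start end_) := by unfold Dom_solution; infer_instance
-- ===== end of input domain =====

-- B replaces A's per-case XOR-propagated `changed` array (built via `determine`, then min over a
-- collected answer list) by a direct greedy simulation that mutates the wrong-bulb mask and keeps a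
-- running best; alternative decomposition, same asymptotic cost.

-- ===== PORT A =====
def determine (bulbs : List Int) (changed : List Bool) (idx : Int) : Bool :=
  if idx = 0 then
    if PySem.List.pyGetD bulbs idx 0 = 0 then PySem.List.pyGetD changed idx false
    else !(PySem.List.pyGetD changed idx false)
  else
    if PySem.List.pyGetD bulbs idx 0 = 0 then
      decide (PySem.List.pyGetD changed (idx - 1) false ≠ PySem.List.pyGetD changed idx false)
    else
      decide (PySem.List.pyGetD changed (idx - 1) false = PySem.List.pyGetD changed idx false)

def solution (n : Int) (start : List Int) (end_ : List Int) : Int :=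
  let bulbs := (PySem.List.pyRange 0 n 1).foldl
    (fun acc i => acc ++ [if PySem.List.pyGetD start i 0 = PySem.List.pyGetD end_ i 0 then (0 : Int) else 1]) []
  let answer := [false, true].foldl (fun ans case_ =>
    let changed := (PySem.List.pyRange 0 (n - 1) 1).foldl
      (fun ch idx => ch ++ [determine bulbs ch idx]) [case_]
    let completed :=
      if PySem.List.pyGetD bulbs (-1) 0 = 0 then
        PySem.List.pyGetD changed (-2) false = PySem.List.pyGetD changed (-1) false
      else
        PySem.List.pyGetD changed (-2) false ≠ PySem.List.pyGetD changed (-1) false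
    if completed then
      ans ++ [(PySem.List.pyRange 0 n 1).foldl
        (fun c i => if PySem.List.pyGetD changed i false then c + 1 else c) (0 : Int)]
    else ans) ([] : List Int)
  if answer.length = 0 then -1
  else (PySem.List.min? answer (fun x => x)).getD (-1)

-- ===== PORT B =====
-- w[i] = not w[i] at a nonnegative in-range index (the only indices Source B uses under Pre_)
def toggleAt (w : List Bool) (i : Nat) : List Bool := w.set i (!(w.getD i false))

def solution_alt (n : Int) (start : List Int) (end_ : List Int) : Int :=
  let wrong := (PySem.List.pyRange 0 n 1).map
    (fun i => decide (PySem.List.pyGetD start i 0 ≠ PySem.List.pyGetD end_ i 0))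
  [false, true].foldl (fun best first =>
    let st0 : List Bool × Int :=
      if first then
        let w := toggleAt wrong 0
        let w := if 1 < n then toggleAt w 1 else w
        (w, 1)
      else (wrong, 0)
    let st := (PySem.List.pyRange 1 n 1).foldl (fun (st : List Bool × Int) i =>
      if st.1.getD (i - 1).toNat false then
        let w := toggleAt st.1 (i - 1).toNat
        let w := toggleAt w i.toNat
        let w := if i + 1 < n then toggleAt w (i + 1).toNat else w
        (w, st.2 + 1)
      else st) st0
    if !(st.1.getD (n - 1).toNat false) then
      if best = -1 ∨ st.2 < best then st.2 else best
    else best) (-1)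

-- ===== PRECONDITION & SPEC =====
-- Pre_ excludes exactly the inputs on which the Python A raises an exception:
-- n ≤ 1 (bulbs[-1] / changed[-2] IndexError) or a list shorter than n (IndexError in the build loop).
def Pre_solution (n : Int) (start : List Int) (end_ : List Int) : Prop :=
  2 ≤ n ∧ n ≤ (start.length : Int) ∧ n ≤ (end_.length : Int)
instance (n : Int) (start : List Int) (end_ : List Int) : Decidable (Pre_solution n start end_) := by
  unfold Pre_solution; infer_instance

def pvWitness_solution : Int × List Int × List Int := (2, [0, 1], [0, 0])

def Spec_solution (n : Int) (start : List Int) (end_ : List Int) (out : Int) : Prop :=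
  out = solution_alt n start end_
instance (n : Int) (start : List Int) (end_ : List Int) (out : Int) : Decidable (Spec_solution n start end_ out) := by
  unfold Spec_solution; infer_instance

-- ===== CLAIM (what is proved, stated in full; the proofs are below) =====
def Claim_equal_solution : Prop := ∀ (n : Int) (start : List Int) (end_ : List Int),
  Dom_solution n start end_ → Pre_solution n start end_ → Spec_solution n start end_ (solution n start end_)

-- ===== LEMMAS AND PROOFS =====

-- mismatch mask as a function
def bfn (start end_ : List Int) (k : Nat) : Bool :=
  decide (start.getD k 0 ≠ end_.getD k 0)

-- the forced press sequence: csq c bf k = "switch k is pressed" given first choice c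
def csP (c : Bool) (bf : Nat → Bool) : Nat → Bool × Bool
  | 0 => (c, xor (bf 0) c)
  | k + 1 => ((csP c bf k).2, xor (bf (k + 1)) (xor (csP c bf k).1 (csP c bf k).2))

def csq (c : Bool) (bf : Nat → Bool) (k : Nat) : Bool := (csP c bf k).1

lemma csq_zero (c : Bool) (bf : Nat → Bool) : csq c bf 0 = c := rfl
lemma csq_one (c : Bool) (bf : Nat → Bool) : csq c bf 1 = xor (bf 0) c := rfl
lemma csq_rec (c : Bool) (bf : Nat → Bool) (k : Nat) :
    csq c bf (k + 2) = xor (bf (k + 1)) (xor (csq c bf k) (csq c bf (k + 1))) := rfl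

def press (c : Bool) (bf : Nat → Bool) (i k : Nat) : Bool := decide (k ≤ i) && csq c bf k

def wAt (c : Bool) (bf : Nat → Bool) (i j : Nat) : Bool :=
  xor (bf j) (xor (press c bf i j) (xor (press c bf i (j + 1))
    (if 1 ≤ j then press c bf i (j - 1) else false)))

def cnt (c : Bool) (bf : Nat → Bool) (i : Nat) : Int :=
  (((List.range (i + 1)).countP (fun k => csq c bf k) : Nat) : Int)

def canon (bf : Nat → Bool) (t : Nat) : Int :=
  let oF := !(csq false bf (t + 2))
  let oT := !(csq true bf (t + 2))
  let kF := cnt false bf (t + 1)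
  let kT := cnt true bf (t + 1)
  if oF && oT then min kF kT else if oF then kF else if oT then kT else -1

lemma wAt_diag (c : Bool) (bf : Nat → Bool) (i : Nat) : wAt c bf i i = csq c bf (i + 1) := by
  cases i with
  | zero => simp [wAt, press, csq_zero, csq_one]
  | succ t =>
      simp only [wAt, press]
      simp only [show t + 1 ≤ t + 1 from le_refl _, show ¬(t + 1 + 1 ≤ t + 1) by omega,
        show (1:Nat) ≤ t + 1 by omega, show t + 1 - 1 = t from rfl, show t ≤ t + 1 by omega,
        decide_eq_true_eq, if_true]
      rw [csq_rec]
      cases bf (t + 1) <;> cases csq c bf t <;> cases csq c bf (t + 1) <;> rfl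

lemma press_succ (c : Bool) (bf : Nat → Bool) (i k : Nat) :
    press c bf (i + 1) k = (press c bf i k || (decide (k = i + 1) && csq c bf k)) := by
  simp only [press]
  by_cases h : k ≤ i
  · simp [h, show k ≤ i + 1 by omega, show k ≠ i + 1 by omega]
  · by_cases h2 : k = i + 1
    · simp [h, h2]
    · simp [h, h2, show ¬(k ≤ i + 1) by omega]

lemma cnt_succ (c : Bool) (bf : Nat → Bool) (i : Nat) :
    cnt c bf (i + 1) = cnt c bf i + (if csq c bf (i + 1) then 1 else 0) := by
  simp only [cnt, List.range_succ, List.countP_append, List.countP_singleton]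
  cases h : csq c bf (i + 1) <;> simp [h]


lemma press_gt (c : Bool) (bf : Nat → Bool) (i k : Nat) (h : i < k) : press c bf i k = false := by
  simp [press, show ¬(k ≤ i) by omega]

lemma press_succ' (c : Bool) (bf : Nat → Bool) (i k : Nat) :
    press c bf (i + 1) k = (press c bf i k || (decide (k = i + 1) && csq c bf (i + 1))) := by
  rw [press_succ]
  by_cases h : k = i + 1 <;> simp [h]

lemma wAt_succ_of_not (c : Bool) (bf : Nat → Bool) (i j : Nat) (h : csq c bf (i + 1) = false) :
    wAt c bf (i + 1) j = wAt c bf i j := by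
  simp only [wAt, press_succ', h, Bool.and_false, Bool.or_false]

lemma wAt_succ_of_press (c : Bool) (bf : Nat → Bool) (i j : Nat) (h : csq c bf (i + 1) = true) :
    wAt c bf (i + 1) j =
      if j = i ∨ j = i + 1 ∨ j = i + 2 then !(wAt c bf i j) else wAt c bf i j := by
  simp only [wAt, press_succ', h, Bool.and_true]
  by_cases h0 : j = i
  · subst h0
    rw [if_pos (Or.inl rfl)]
    have d3 : (if 1 ≤ j then press c bf j (j - 1) || decide (j - 1 = j + 1) else false)
        = (if 1 ≤ j then press c bf j (j - 1) else false) := by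
      by_cases hj : 1 ≤ j <;> simp [hj, show ¬(j - 1 = j + 1) by omega]
    rw [d3, press_gt c bf j (j + 1) (by omega)]
    cases bf j <;> cases press c bf j j <;>
      cases (if 1 ≤ j then press c bf j (j - 1) else false) <;>
      simp [show ¬(j = j + 1) by omega]
  · by_cases h1 : j = i + 1
    · subst h1
      rw [if_pos (Or.inr (Or.inl rfl))]
      rw [if_pos (show (1:Nat) ≤ i + 1 by omega), if_pos (show (1:Nat) ≤ i + 1 by omega),
        show i + 1 - 1 = i from rfl, press_gt c bf i (i + 1) (by omega)]
      cases bf (i + 1) <;> cases press c bf i (i + 1 + 1) <;> cases press c bf i i <;>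
        simp [show ¬(i + 1 + 1 = i + 1) by omega, show ¬(i = i + 1) by omega]
    · by_cases h2 : j = i + 2
      · subst h2
        rw [if_pos (Or.inr (Or.inr rfl))]
        rw [if_pos (show (1:Nat) ≤ i + 2 by omega), if_pos (show (1:Nat) ≤ i + 2 by omega),
          show i + 2 - 1 = i + 1 from rfl, press_gt c bf i (i + 1) (by omega)]
        cases bf (i + 2) <;> cases press c bf i (i + 2) <;> cases press c bf i (i + 2 + 1) <;>
          simp [show ¬(i + 2 = i + 1) by omega, show ¬(i + 2 + 1 = i + 1) by omega]
      · have hne : j - 1 ≠ i + 1 := by omega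
        have d3 : (if 1 ≤ j then press c bf i (j - 1) || decide (j - 1 = i + 1) else false)
            = (if 1 ≤ j then press c bf i (j - 1) else false) := by
          by_cases hj : 1 ≤ j <;> simp [hj, hne]
        rw [d3, if_neg (show ¬(j = i ∨ j = i + 1 ∨ j = i + 2) by omega)]
        simp [show ¬(j = i + 1) from h1, show ¬(j + 1 = i + 1) by omega]
        intro hji; exact absurd hji h0

lemma getD_map_range' (f : Nat → Bool) (m k : Nat) (hk : k < m) :
    ((List.range m).map f).getD k false = f k := by
  rw [List.getD_eq_getElem?_getD]
  simp [List.getElem?_map, List.getElem?_range, hk]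

lemma getD_map_range_int (f : Nat → Int) (m k : Nat) (hk : k < m) :
    ((List.range m).map f).getD k 0 = f k := by
  rw [List.getD_eq_getElem?_getD]
  simp [List.getElem?_map, List.getElem?_range, hk]

lemma toggleAt_map_range (f : Nat → Bool) (m i : Nat) (hi : i < m) :
    toggleAt ((List.range m).map f) i
      = (List.range m).map (fun j => if j = i then !(f j) else f j) := by
  unfold toggleAt
  rw [getD_map_range' f m i hi]
  apply List.ext_getElem
  · simp
  · intro k hk1 hk2
    simp only [List.length_set, List.length_map, List.length_range] at hk1
    rw [List.getElem_set]
    simp only [List.getElem_map, List.getElem_range]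
    by_cases hik : i = k
    · simp [hik]
    · simp [hik, Ne.symm hik]

lemma bulbs_eq (start end_ : List Int) (m : Nat) :
    (PySem.List.pyRange 0 (m : Int) 1).foldl
      (fun acc i => acc ++ [if PySem.List.pyGetD start i 0 = PySem.List.pyGetD end_ i 0 then (0 : Int) else 1]) []
      = (List.range m).map (fun k => if bfn start end_ k then (1 : Int) else 0) := by
  rw [PySem.List.pyRange_zero_natCast, List.foldl_map, PySem.List.foldl_append_singleton_eq_map]
  simp only [List.nil_append, List.map_map]
  apply List.map_congr_left
  intro k _
  simp only [Function.comp, PySem.List.pyGetD_natCast, bfn]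
  by_cases h : start.getD k 0 = end_.getD k 0 <;> simp [h]

lemma wrong_eq (start end_ : List Int) (m : Nat) :
    ((PySem.List.pyRange 0 (m : Int) 1).map
        (fun i => decide (PySem.List.pyGetD start i 0 ≠ PySem.List.pyGetD end_ i 0)))
      = (List.range m).map (bfn start end_) := by
  rw [PySem.List.pyRange_zero_natCast, List.map_map]
  apply List.map_congr_left
  intro k _
  simp [Function.comp, PySem.List.pyGetD_natCast, bfn]

lemma changed_eq (start end_ : List Int) (m : Nat) (c : Bool) :
    ∀ j : Nat, j + 1 ≤ m →
    (PySem.List.pyRange 0 (j : Int) 1).foldl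
        (fun ch idx => ch ++ [determine ((List.range m).map (fun k => if bfn start end_ k then (1 : Int) else 0)) ch idx]) [c]
      = (List.range (j + 1)).map (csq c (bfn start end_)) := by
  intro j
  induction j with
  | zero =>
      intro _
      simp only [Nat.cast_zero]
      rw [PySem.List.pyRange_one_eq_nil (le_refl 0)]
      simp [List.range_one, csq_zero]
  | succ t ih =>
      intro h
      have hcast : ((t + 1 : Nat) : Int) = (t : Int) + 1 := by push_cast; ring
      rw [hcast, PySem.List.pyRange_one_succ_right (by positivity), List.foldl_append,
        ih (by omega)]
      simp only [List.foldl_cons, List.foldl_nil]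
      have hdet : determine ((List.range m).map (fun k => if bfn start end_ k then (1 : Int) else 0))
          ((List.range (t + 1)).map (csq c (bfn start end_))) ((t : Nat) : Int)
          = csq c (bfn start end_) (t + 1) := by
        cases t with
        | zero =>
            simp only [determine, Nat.cast_zero, if_pos rfl, PySem.List.pyGetD_zero,
              getD_map_range_int _ m 0 (by omega), getD_map_range' _ 1 0 (by omega)]
            cases hb : bfn start end_ 0 <;> simp [hb, csq_zero, csq_one]
        | succ u =>
            have hne : ((u + 1 : Nat) : Int) ≠ 0 := by positivity
            have hm1 : ((u + 1 : Nat) : Int) - 1 = ((u : Nat) : Int) := by push_cast; ring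
            simp only [determine, if_neg hne, hm1, PySem.List.pyGetD_natCast,
              getD_map_range_int _ m (u + 1) (by omega),
              getD_map_range' _ (u + 1 + 1) (u + 1) (by omega),
              getD_map_range' _ (u + 1 + 1) u (by omega)]
            rw [show u + 1 + 1 = u + 2 from rfl, csq_rec]
            cases hb : bfn start end_ (u + 1) <;>
              cases csq c (bfn start end_) u <;> cases csq c (bfn start end_) (u + 1) <;>
                simp [hb]
      rw [hdet]
      simp [List.range_succ]

lemma wAt_zero_false (bf : Nat → Bool) (j : Nat) : wAt false bf 0 j = bf j := by
  have hp : ∀ k, press false bf 0 k = false := by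
    intro k
    cases k with
    | zero => simp [press, csq_zero]
    | succ u => simp [press]
  simp [wAt, hp]

lemma wAt_zero_true (bf : Nat → Bool) (j : Nat) :
    wAt true bf 0 j = (if j = 1 then !(if j = 0 then !(bf j) else bf j)
      else if j = 0 then !(bf j) else bf j) := by
  have hp : ∀ k, press true bf 0 k = decide (k = 0) := by
    intro k
    cases k with
    | zero => simp [press, csq_zero]
    | succ u => simp [press]
  match j with
  | 0 => simp [wAt, hp]
  | 1 => simp [wAt, hp]
  | (u + 2) => simp only [wAt, hp]; simp

lemma B_loop (start end_ : List Int) (m : Nat) (c : Bool) (hm : 2 ≤ m) :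
    ∀ i : Nat, i + 1 ≤ m →
    (PySem.List.pyRange 1 ((i + 1 : Nat) : Int) 1).foldl
      (fun (st : List Bool × Int) iv =>
        if st.1.getD (iv - 1).toNat false then
          (if iv + 1 < (m : Int) then
              toggleAt (toggleAt (toggleAt st.1 (iv - 1).toNat) iv.toNat) (iv + 1).toNat
            else toggleAt (toggleAt st.1 (iv - 1).toNat) iv.toNat, st.2 + 1)
        else st)
      ((List.range m).map (wAt c (bfn start end_) 0), cnt c (bfn start end_) 0)
    = ((List.range m).map (wAt c (bfn start end_) i), cnt c (bfn start end_) i) := by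
  intro i
  induction i with
  | zero =>
      intro _
      rw [show ((0 + 1 : Nat) : Int) = 1 by norm_num, PySem.List.pyRange_one_eq_nil (le_refl 1)]
      rfl
  | succ t ih =>
      intro h
      have hcast : ((t + 1 + 1 : Nat) : Int) = ((t + 1 : Nat) : Int) + 1 := by push_cast; ring
      rw [hcast, PySem.List.pyRange_one_succ_right (by omega), List.foldl_append,
        ih (by omega)]
      simp only [List.foldl_cons, List.foldl_nil]
      have e1 : (((t + 1 : Nat) : Int) - 1).toNat = t := by omega
      have e2 : ((t + 1 : Nat) : Int).toNat = t + 1 := by omega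
      have e3 : (((t + 1 : Nat) : Int) + 1).toNat = t + 2 := by omega
      rw [e1, e2, e3, getD_map_range' _ m t (by omega), wAt_diag]
      by_cases hcs : csq c (bfn start end_) (t + 1)
      · rw [if_pos hcs]
        have hcnt : cnt c (bfn start end_) (t + 1) = cnt c (bfn start end_) t + 1 := by
          rw [cnt_succ, hcs]; simp
        by_cases hlt : t + 2 < m
        · rw [if_pos (show ((t + 1 : Nat) : Int) + 1 < (m : Int) by push_cast; omega)]
          rw [toggleAt_map_range _ m t (by omega), toggleAt_map_range _ m (t + 1) (by omega),
            toggleAt_map_range _ m (t + 2) hlt, hcnt]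
          refine Prod.ext ?_ rfl
          apply List.map_congr_left
          intro j hj
          rw [List.mem_range] at hj
          rw [wAt_succ_of_press c _ t j hcs]
          by_cases h0 : j = t <;> by_cases h1 : j = t + 1 <;> by_cases h2 : j = t + 2 <;>
            simp [h0, h1, h2] <;> omega
        · rw [if_neg (show ¬(((t + 1 : Nat) : Int) + 1 < (m : Int)) by push_cast; omega)]
          rw [toggleAt_map_range _ m t (by omega), toggleAt_map_range _ m (t + 1) (by omega), hcnt]
          refine Prod.ext ?_ rfl
          apply List.map_congr_left
          intro j hj
          rw [List.mem_range] at hj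
          rw [wAt_succ_of_press c _ t j hcs]
          by_cases h0 : j = t <;> by_cases h1 : j = t + 1 <;>
            simp [h0, h1, show ¬(j = t + 2) by omega] <;> omega
      · rw [if_neg (by simp [hcs])]
        have hcnt : cnt c (bfn start end_) (t + 1) = cnt c (bfn start end_) t := by
          rw [cnt_succ]; simp [hcs]
        rw [hcnt]
        refine Prod.ext ?_ rfl
        apply List.map_congr_left
        intro j hj
        rw [wAt_succ_of_not c _ t j (by simpa using hcs)]

lemma count_map_range (f : Nat → Bool) (m : Nat) :
    (PySem.List.pyRange 0 (m : Int) 1).foldl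
      (fun c i => if PySem.List.pyGetD ((List.range m).map f) i false then c + 1 else c) (0 : Int)
      = (((List.range m).countP f : Nat) : Int) := by
  rw [show (m : Int) = (((List.range m).map f).length : Int) by simp]
  rw [PySem.List.foldl_pyRange_zero_pyGetD' ((List.range m).map f) false
    (fun acc x => if x = true then acc + 1 else acc) 0]
  rw [PySem.List.foldl_count_if]
  simp only [Int.zero_add, List.countP_map]
  rfl

lemma pyGetD_neg1_map_range {α : Type} (f : Nat → α) (m : Nat) (d : α) (hm : 0 < m) :
    PySem.List.pyGetD ((List.range m).map f) (-1) d = f (m - 1) := by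
  rw [PySem.List.pyGetD_neg_ofNat _ 1 d (by omega) (by simp; omega)]
  simp [List.getElem_map, List.getElem_range]

lemma pyGetD_neg2_map_range {α : Type} (f : Nat → α) (m : Nat) (d : α) (hm : 2 ≤ m) :
    PySem.List.pyGetD ((List.range m).map f) (-2) d = f (m - 2) := by
  rw [PySem.List.pyGetD_neg_ofNat _ 2 d (by omega) (by simp; omega)]
  simp [List.getElem_map, List.getElem_range]

lemma completed_iff (c : Bool) (bf : Nat → Bool) (t : Nat) :
    (if (if bf (t + 1) then (1 : Int) else 0) = 0
      then csq c bf t = csq c bf (t + 1)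
      else ¬(csq c bf t = csq c bf (t + 1)))
    ↔ csq c bf (t + 2) = false := by
  rw [csq_rec]
  cases bf (t + 1) <;> cases csq c bf t <;> cases csq c bf (t + 1) <;> simp

-- ===== VERDICT (by name: the statement is the Claim_ definition above) =====
theorem solution_spec : Claim_equal_solution := by
  unfold Claim_equal_solution
  intro n start end_ _ hpre
  obtain ⟨h2, hs, he⟩ := hpre
  obtain ⟨t, rfl⟩ : ∃ t : Nat, n = ((t + 2 : Nat) : Int) := ⟨(n - 2).toNat, by omega⟩
  have hs' : t + 2 ≤ start.length := by exact_mod_cast hs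
  have he' : t + 2 ≤ end_.length := by exact_mod_cast he
  unfold Spec_solution
  simp only [solution, solution_alt]
  rw [bulbs_eq start end_ (t + 2), wrong_eq start end_ (t + 2)]
  simp only [List.foldl_cons, List.foldl_nil]
  simp only [show ((false : Bool) = true) = False from by simp,
    show ((true : Bool) = true) = True from by simp, if_false, if_true]
  rw [show ((t + 2 : Nat) : Int) - 1 = ((t + 1 : Nat) : Int) by push_cast; ring]
  rw [changed_eq start end_ (t + 2) false (t + 1) (by omega),
      changed_eq start end_ (t + 2) true (t + 1) (by omega)]
  simp only [show t + 1 + 1 = t + 2 from rfl]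
  rw [pyGetD_neg1_map_range (fun k => if bfn start end_ k = true then (1 : Int) else 0)
        (t + 2) 0 (by omega)]
  rw [pyGetD_neg2_map_range (csq false (bfn start end_)) (t + 2) false (by omega),
      pyGetD_neg2_map_range (csq true (bfn start end_)) (t + 2) false (by omega),
      pyGetD_neg1_map_range (csq false (bfn start end_)) (t + 2) false (by omega),
      pyGetD_neg1_map_range (csq true (bfn start end_)) (t + 2) false (by omega)]
  simp only [show t + 2 - 1 = t + 1 from rfl, show t + 2 - 2 = t from rfl]
  rw [count_map_range (csq false (bfn start end_)) (t + 2),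
      count_map_range (csq true (bfn start end_)) (t + 2)]
  simp only [completed_iff]
  -- B initial states
  rw [if_pos (show (1 : Int) < ((t + 2 : Nat) : Int) by push_cast; omega)]
  simp only [toggleAt_map_range (bfn start end_) (t + 2) 0 (by omega)]
  simp only [toggleAt_map_range (fun j => if j = 0 then !(bfn start end_ j) else bfn start end_ j)
    (t + 2) 1 (by omega)]
  rw [List.map_congr_left (fun j (_ : j ∈ List.range (t + 2)) => (wAt_zero_false (bfn start end_) j).symm)]
  rw [List.map_congr_left (fun j (_ : j ∈ List.range (t + 2)) => (wAt_zero_true (bfn start end_) j).symm)]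
  -- B loops
  have c0 : cnt false (bfn start end_) 0 = 0 := by
    simp [cnt, List.range_one, csq_zero]
  have c1 : cnt true (bfn start end_) 0 = 1 := by
    simp [cnt, List.range_one, csq_zero]
  have hBF := B_loop start end_ (t + 2) false (by omega) (t + 1) (by omega)
  have hBT := B_loop start end_ (t + 2) true (by omega) (t + 1) (by omega)
  rw [c0] at hBF
  rw [c1] at hBT
  simp only [show t + 1 + 1 = t + 2 from rfl] at hBF hBT
  rw [hBF, hBT]
  -- B final reads
  simp only [Int.toNat_natCast, getD_map_range' _ (t + 2) (t + 1) (by omega), wAt_diag]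
  simp only [show t + 1 + 1 = t + 2 from rfl]
  have hkF : 0 ≤ ((((List.range (t + 2)).countP (csq false (bfn start end_))) : Nat) : Int) :=
    Int.natCast_nonneg _
  have hkT : 0 ≤ ((((List.range (t + 2)).countP (csq true (bfn start end_))) : Nat) : Int) :=
    Int.natCast_nonneg _
  by_cases hF : csq false (bfn start end_) (t + 2) = false <;>
    by_cases hT : csq true (bfn start end_) (t + 2) = false <;>
      simp [hF, hT, cnt, show t + 1 + 1 = t + 2 from rfl,
        show (fun k => csq false (bfn start end_) k) = csq false (bfn start end_) from rfl,
        show (fun k => csq true (bfn start end_) k) = csq true (bfn start end_) from rfl]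
  · -- both valid: min of the two counts
    rw [PySem.List.min?_id_cons]
    simp only [List.foldl_cons, List.foldl_nil, Option.getD_some]
    rw [min_def]
    split_ifs <;> omega
  · -- only first valid
    rw [PySem.List.min?_id_cons]
    simp only [List.foldl_nil, Option.getD_some]
  · -- only second valid
    rw [PySem.List.min?_id_cons]
    simp only [List.foldl_nil, Option.getD_some]
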